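-- pv_equiv track=rewrite | github.com/Lightthouse/ozon-tasks | main_event_tasks/d.py | make_sports_result_dict
-- ===== SOURCE A (Python) =====
-- def make_sports_result_dict(results):
--     data = {}
--     for racer, result in enumerate(results):
--         if result not in data.keys():
--             data[result] = []
--         data[result].append(racer)
--     data = {key: data[key] for key in sorted(data)}
--     return data
-- ===== SOURCE B (Python) =====
-- def make_sports_result_dict(results):
--     data = {}
--     for racer, result in sorted(enumerate(results), key=lambda p: p[1]):
--         if result in data:
--             data[result].append(racer)
--         else:
--             data[result] = [racer]
--     return data
-- ===== Notes on version B (the rewrite author's own statement) =====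
-- stated objective: alternative
-- what changed: Instead of grouping in encounter order and then rebuilding the dict over sorted keys, B stably sorts the (index, result) pairs by result first and builds the dict in a single post-sort pass, so keys arrive already in sorted order and no final re-keying pass is needed.
import Mathlib
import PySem

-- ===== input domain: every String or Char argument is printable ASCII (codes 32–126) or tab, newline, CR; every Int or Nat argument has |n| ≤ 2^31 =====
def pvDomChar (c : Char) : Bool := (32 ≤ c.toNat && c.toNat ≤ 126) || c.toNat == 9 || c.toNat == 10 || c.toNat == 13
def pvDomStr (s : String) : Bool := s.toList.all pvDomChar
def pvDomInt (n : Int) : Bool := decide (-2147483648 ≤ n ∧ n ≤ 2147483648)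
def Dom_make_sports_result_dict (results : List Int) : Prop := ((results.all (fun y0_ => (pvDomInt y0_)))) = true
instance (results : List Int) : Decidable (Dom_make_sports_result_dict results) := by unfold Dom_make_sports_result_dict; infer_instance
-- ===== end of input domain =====

-- B sorts the (racer, result) pairs stably by result and builds the dict in one post-sort
-- pass (keys arrive already sorted), instead of A's group-in-encounter-order then rebuild
-- over sorted keys; same return value, an alternative decomposition of the same cost.

-- ===== PORT A =====
def make_sports_result_dict (results : List Int) : List (Int × List Int) :=
  let data := (PySem.List.enumerate results 0).foldl
    (fun d p =>
      let d := if d.contains p.2 = false then d.insert p.2 ([] : List Int) else d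
      d.insert p.2 (d.getD p.2 [] ++ [p.1]))
    PySem.Dict.empty
  (PySem.Dict.ofList ((PySem.List.sorted data.keys (fun k => k) false).map
    (fun k => (k, data.getD k [])))).items

-- ===== PORT B =====
def make_sports_result_dict_alt (results : List Int) : List (Int × List Int) :=
  ((PySem.List.sorted (PySem.List.enumerate results 0) (fun p => p.2) false).foldl
    (fun d p =>
      if d.contains p.2 = true then d.insert p.2 (d.getD p.2 [] ++ [p.1])
      else d.insert p.2 [p.1])
    PySem.Dict.empty).items

-- ===== PRECONDITION & SPEC =====
def Spec_make_sports_result_dict (results : List Int) (out : List (Int × List Int)) : Prop := out = make_sports_result_dict_alt results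
instance (results : List Int) (out : List (Int × List Int)) : Decidable (Spec_make_sports_result_dict results out) := by unfold Spec_make_sports_result_dict; infer_instance

-- ===== CLAIM (what is proved, stated in full; the proofs are below) =====
def Claim_equal_make_sports_result_dict : Prop := ∀ (results : List Int), Dom_make_sports_result_dict results → Spec_make_sports_result_dict results (make_sports_result_dict results)

-- ===== LEMMAS AND PROOFS =====

-- the group of racer indices whose result is k, in original order
def pvGroup (results : List Int) (k : Int) : List Int :=
  ((PySem.List.enumerate results 0).filter (fun p => p.2 == k)).map (fun p => p.1)

-- both loop bodies are the same dict "append to group" update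
theorem pv_stepA_eq (d : PySem.Dict Int (List Int)) (p : Int × Int) :
    (let d' := if d.contains p.2 = false then d.insert p.2 ([] : List Int) else d
     d'.insert p.2 (d'.getD p.2 [] ++ [p.1])) =
    d.modify p.2 [] (fun v => v ++ [p.1]) := by
  by_cases h : d.contains p.2 = true
  · simp [h, PySem.Dict.modify]
  · simp only [Bool.not_eq_true] at h
    simp [h, PySem.Dict.modify, PySem.Dict.getD_insert_self,
      PySem.Dict.insert_insert_self, PySem.Dict.getD_of_not_contains d ([] : List Int) h]

theorem pv_stepB_eq (d : PySem.Dict Int (List Int)) (p : Int × Int) :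
    (if d.contains p.2 = true then d.insert p.2 (d.getD p.2 [] ++ [p.1])
     else d.insert p.2 [p.1]) =
    d.modify p.2 [] (fun v => v ++ [p.1]) := by
  by_cases h : d.contains p.2 = true
  · simp [h, PySem.Dict.modify]
  · simp only [Bool.not_eq_true] at h
    simp [h, PySem.Dict.modify, PySem.Dict.getD_of_not_contains d ([] : List Int) h]

-- the grouping fold, described by getD / keys
theorem pv_fold_getD (l : List (Int × Int)) (k : Int) :
    (l.foldl (fun d p => d.modify p.2 [] (fun v => v ++ [p.1])) PySem.Dict.empty).getD k [] =
    (l.filter (fun p => p.2 == k)).map (fun p => p.1) := by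
  have h1 : l.foldl (fun d p => d.modify p.2 [] (fun v => v ++ [p.1])) PySem.Dict.empty
      = (l.map Prod.swap).foldl (fun d q => d.modify q.1 [] (fun v => v ++ [q.2])) PySem.Dict.empty := by
    rw [List.foldl_map]
    rfl
  rw [h1, PySem.Dict.getD_foldl_modify_append, PySem.Dict.getD_empty, List.filter_map,
    List.map_map]
  rfl

theorem pv_fold_keys (l : List (Int × Int)) :
    (l.foldl (fun d p => d.modify p.2 [] (fun v => v ++ [p.1])) PySem.Dict.empty).keys =
    PySem.Set.ofList (l.map (fun p => p.2)) := by
  rw [PySem.Dict.keys_foldl_modify_key l (fun p => p.2) [] (fun _ p => fun v => v ++ [p.1])]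
  rw [PySem.Dict.keys_empty, PySem.Set.update_nil_left]

theorem pv_fold_nodup (l : List (Int × Int)) :
    (l.foldl (fun d p => d.modify p.2 [] (fun v => v ++ [p.1])) PySem.Dict.empty).keys.Nodup :=
  PySem.Dict.nodup_keys_foldl_modify_key l (fun p => p.2) [] (fun _ p => fun v => v ++ [p.1])
    PySem.Dict.empty PySem.Dict.nodup_keys_empty

-- Set.ofList is a sublist of its argument
theorem pv_foldl_add_append {α : Type} [BEq α] :
    ∀ (l s : List α), ∃ t, List.foldl PySem.Set.add s l = s ++ t ∧ t.Sublist l := by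
  intro l
  induction l with
  | nil => intro s; exact ⟨[], by simp⟩
  | cons x xs ih =>
    intro s
    rw [List.foldl_cons]
    by_cases h : PySem.Set.contains s x = true
    · have hadd : PySem.Set.add s x = s := by simp [PySem.Set.add, PySem.Set.contains] at h ⊢; simp [h]
      rw [hadd]
      obtain ⟨t, ht, hs⟩ := ih s
      exact ⟨t, ht, hs.cons _⟩
    · have hadd : PySem.Set.add s x = s ++ [x] := by
        simp [PySem.Set.add, PySem.Set.contains] at h ⊢; simp [h]
      rw [hadd]
      obtain ⟨t, ht, hs⟩ := ih (s ++ [x])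
      exact ⟨x :: t, by simpa using ht, hs.cons₂ _⟩
theorem pv_ofList_sublist {α : Type} [BEq α] (l : List α) :
    (PySem.Set.ofList l).Sublist l := by
  obtain ⟨t, ht, hs⟩ := pv_foldl_add_append l []
  simpa [PySem.Set.ofList, ht] using hs

theorem pv_ofList_pairwise_lt (l : List Int) (h : l.Pairwise (fun a b => a ≤ b)) :
    (PySem.Set.ofList l).Pairwise (fun a b => a < b) := by
  have hle : (PySem.Set.ofList l).Pairwise (fun a b => a ≤ b) :=
    List.Pairwise.sublist (pv_ofList_sublist l) h
  have hne : (PySem.Set.ofList l).Pairwise (fun a b => a ≠ b) := PySem.Set.nodup_ofList l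
  exact (hle.and hne).imp (fun hab => lt_of_le_of_ne hab.1 hab.2)

-- stability of Python's sort: filtering one key class commutes with sorting
theorem pv_filter_insertBy {α κ : Type} [LinearOrder κ] (key : α → κ) (k : κ) (x : α) :
    ∀ (acc : List α), acc.Pairwise (fun a b => key a ≤ key b) →
    (PySem.List.insertBy (fun a b => decide (key a < key b)) x acc).filter (fun y => key y == k) =
      acc.filter (fun y => key y == k) ++ if key x == k then [x] else [] := by
  intro acc
  induction acc with
  | nil =>
    intro _
    by_cases hk : (key x == k) = true <;> simp [PySem.List.insertBy, hk]
  | cons y ys ih =>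
    intro h
    rw [List.pairwise_cons] at h
    by_cases hb : key x < key y
    · have hstep : PySem.List.insertBy (fun a b => decide (key a < key b)) x (y :: ys)
          = x :: y :: ys := by simp [PySem.List.insertBy, hb]
      rw [hstep]
      by_cases hk : (key x == k) = true
      · have hkx : key x = k := by simpa using hk
        have hky : (key y == k) = false := by
          simp only [beq_eq_false_iff_ne, ne_eq]
          intro hyk
          exact absurd hb (by rw [hkx, hyk]; exact lt_irrefl k)
        have hys : ∀ z ∈ ys, (key z == k) = false := by
          intro z hz
          simp only [beq_eq_false_iff_ne, ne_eq]
          intro hzk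
          exact absurd (lt_of_lt_of_le hb (h.1 z hz)) (by rw [hkx, hzk]; exact lt_irrefl k)
        have hnil : List.filter (fun y => key y == k) ys = [] :=
          List.filter_eq_nil_iff.mpr (fun z hz => by simp [hys z hz])
        simp [hk, hky, hnil]
      · simp [List.filter_cons, hk]
    · have hstep : PySem.List.insertBy (fun a b => decide (key a < key b)) x (y :: ys)
          = y :: PySem.List.insertBy (fun a b => decide (key a < key b)) x ys := by
        simp [PySem.List.insertBy, hb]
      rw [hstep]
      rw [List.filter_cons, List.filter_cons, ih h.2]
      by_cases hky : key y == k <;> simp [hky]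

theorem pv_foldl_ins_filter {α κ : Type} [LinearOrder κ] (key : α → κ) (k : κ) :
    ∀ (l acc : List α), acc.Pairwise (fun a b => key a ≤ key b) →
    (l.foldl (fun acc x => PySem.List.insertBy (fun a b => decide (key a < key b)) x acc) acc).filter
        (fun y => key y == k) =
      acc.filter (fun y => key y == k) ++ l.filter (fun y => key y == k) := by
  intro l
  induction l with
  | nil => intro acc _; simp
  | cons x xs ih =>
    intro acc h
    rw [List.foldl_cons, ih _ (PySem.List.insertBy_pairwise_le key x acc h),
      pv_filter_insertBy key k x acc h, List.filter_cons]
    by_cases hk : key x == k <;> simp [hk]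

theorem pv_sorted_filter {α κ : Type} [LinearOrder κ] (xs : List α) (key : α → κ) (k : κ) :
    (PySem.List.sorted xs key false).filter (fun y => key y == k) =
      xs.filter (fun y => key y == k) := by
  rw [PySem.List.sorted_eq_foldl_insertBy]
  simpa using pv_foldl_ins_filter key k xs [] (by simp)

-- A computes the canonical table
theorem pv_A_eq (results : List Int) :
    make_sports_result_dict results =
      (PySem.List.sorted (PySem.Set.ofList results) (fun k => k) false).map
        (fun k => (k, pvGroup results k)) := by
  unfold make_sports_result_dict
  have hstep : (fun (d : PySem.Dict Int (List Int)) (p : Int × Int) =>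
      let d' := if d.contains p.2 = false then d.insert p.2 ([] : List Int) else d
      d'.insert p.2 (d'.getD p.2 [] ++ [p.1])) =
      (fun d p => d.modify p.2 [] (fun v => v ++ [p.1])) := by
    funext d p; exact pv_stepA_eq d p
  rw [hstep]
  set E := PySem.List.enumerate results 0 with hE
  set dA := E.foldl (fun d p => d.modify p.2 [] (fun v => v ++ [p.1])) PySem.Dict.empty with hdA
  have hkeys : dA.keys = PySem.Set.ofList results := by
    rw [hdA, pv_fold_keys, hE, PySem.List.map_snd_enumerate]
  have hget : ∀ k, dA.getD k [] = pvGroup results k := fun k => pv_fold_getD E k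
  set K := PySem.List.sorted (PySem.Set.ofList results) (fun k => k) false with hK
  have hL : (PySem.List.sorted dA.keys (fun k => k) false).map (fun k => (k, dA.getD k [])) =
      K.map (fun k => (k, pvGroup results k)) := by
    rw [hkeys]
    exact List.map_congr_left (fun k _ => by rw [hget k])
  show (PySem.Dict.ofList ((PySem.List.sorted dA.keys (fun k => k) false).map
      (fun k => (k, dA.getD k [])))).items = K.map (fun k => (k, pvGroup results k))
  rw [hL]
  -- rebuilding the dict over distinct keys returns exactly that list of items
  have hknodup : K.Nodup := by
    have hperm := PySem.List.sorted_perm (PySem.Set.ofList results) (fun k => k) false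
    exact hperm.nodup_iff.mpr (PySem.Set.nodup_ofList results)
  have hfresh := PySem.Dict.items_foldl_insert_fresh
    (K.map (fun k => (k, pvGroup results k))) (fun a => a.1) (fun a => a.2) PySem.Dict.empty
    (fun a _ => PySem.Dict.contains_empty a.1)
    (by simpa [Function.comp_def] using hknodup)
  simp only [PySem.Dict.ofList, PySem.Dict.update]
  rw [hfresh]
  simp [PySem.Dict.empty]

-- B computes the canonical table
theorem pv_B_eq (results : List Int) :
    make_sports_result_dict_alt results =
      (PySem.List.sorted (PySem.Set.ofList results) (fun k => k) false).map
        (fun k => (k, pvGroup results k)) := by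
  unfold make_sports_result_dict_alt
  have hstep : (fun (d : PySem.Dict Int (List Int)) (p : Int × Int) =>
      if d.contains p.2 = true then d.insert p.2 (d.getD p.2 [] ++ [p.1])
      else d.insert p.2 [p.1]) =
      (fun d p => d.modify p.2 [] (fun v => v ++ [p.1])) := by
    funext d p; exact pv_stepB_eq d p
  rw [hstep]
  set E := PySem.List.enumerate results 0 with hE
  set S := PySem.List.sorted E (fun p => p.2) false with hS
  set dB := S.foldl (fun d p => d.modify p.2 [] (fun v => v ++ [p.1])) PySem.Dict.empty with hdB
  have hitems := PySem.Dict.items_eq_map_keys dB (pv_fold_nodup S) []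
  rw [hitems, pv_fold_keys]
  have hKeq : PySem.Set.ofList (S.map (fun p => p.2)) =
      PySem.List.sorted (PySem.Set.ofList results) (fun k => k) false := by
    symm
    apply PySem.List.sorted_eq_of_perm_of_pairwise_lt
    · apply (List.perm_ext_iff_of_nodup (PySem.Set.nodup_ofList _) (PySem.Set.nodup_ofList _)).mpr
      intro a
      rw [PySem.Set.mem_ofList, PySem.Set.mem_ofList, List.mem_map]
      constructor
      · rintro ⟨p, hp, rfl⟩
        rw [hS, PySem.List.mem_sorted] at hp
        have : p.2 ∈ E.map (fun p => p.2) := List.mem_map.mpr ⟨p, hp, rfl⟩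
        rwa [hE, PySem.List.map_snd_enumerate] at this
      · intro ha
        have : a ∈ E.map (fun p => p.2) := by rwa [hE, PySem.List.map_snd_enumerate]
        obtain ⟨p, hp, rfl⟩ := List.mem_map.mp this
        exact ⟨p, by rw [hS, PySem.List.mem_sorted]; exact hp, rfl⟩
    · exact pv_ofList_pairwise_lt _ (by simpa [hS] using
        PySem.List.sorted_map_key_pairwise E (fun p => p.2))
  rw [hKeq]
  apply List.map_congr_left
  intro k _
  rw [pv_fold_getD S k]
  have := pv_sorted_filter E (fun p => p.2) k
  rw [hS, this]
  rfl

-- ===== VERDICT (by name: the statement is the Claim_ definition above) =====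
theorem make_sports_result_dict_spec : Claim_equal_make_sports_result_dict := by
  intro results _
  unfold Spec_make_sports_result_dict
  rw [pv_A_eq, pv_B_eq]
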